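-- pv_equiv track=rewrite | github.com/Divyae52/TCAWCodeLinks | CodeLink 11.py | tiltUp
-- ===== SOURCE A (Python) =====
-- def tiltLeft(board):
--
--     newBoard = [
--                 [0,0,0,0],
--                 [0,0,0,0],
--                 [0,0,0,0],
--                 [0,0,0,0]]
--
--     for row in range(0,4):
--
--         # first slide through any spaces
--         loading = 0
--         for col in range(0, 4):
--             if board[row][col] != 0:
--                 newBoard[row][loading] = board[row][col]
--                 loading = loading + 1
--
--         # do resulting columns 0 and 1 match?
--         if (newBoard[row][0] == newBoard[row][1]):
--
--             # combine and slide
--             newBoard[row][0] = newBoard[row][0] * 2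
--             newBoard[row][1] = newBoard[row][2]
--             newBoard[row][2] = newBoard[row][3]
--             newBoard[row][3] = 0
--
--             # do resulting 1 and 2 match?
--             if (newBoard[row][1] == newBoard[row][2]):
--
--                 # combine and slide, then finished
--                 newBoard[row][1] = newBoard[row][1] * 2
--                 newBoard[row][2] = newBoard[row][3]
--                 newBoard[row][3] = 0
--
--             elif (newBoard[row][2] == newBoard[row][3]):
--
--                 # combine and slide, then finished
--                 newBoard[row][2] = newBoard[row][2] * 2
--                 newBoard[row][3] = 0
--
--         elif (newBoard[row][1] == newBoard[row][2]):
--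
--             # combine and slide, then finished
--             newBoard[row][1] = newBoard[row][1] * 2
--             newBoard[row][2] = newBoard[row][3]
--             newBoard[row][3] = 0
--
--         elif (newBoard[row][2] == newBoard[row][3]):
--
--             # combine and slide, then finished
--             newBoard[row][2] = newBoard[row][2] * 2
--             newBoard[row][3] = 0
--
--     return newBoard
--
-- def tiltUp(board):
--
--     newBoard1 = [
--                 [0,0,0,0],
--                 [0,0,0,0],
--                 [0,0,0,0],
--                 [0,0,0,0]]
--
--     newBoard2 = [[0,0,0,0],
--              [0,0,0,0],
--              [0,0,0,0],
--              [0,0,0,0]]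
--
--
--     # rotate the board to the left
--     loading = 0
--     for col in range(3,-1,-1):
--         for row in range(0,4):
--             newBoard1[loading][row] = board[row][col]
--         loading = loading + 1
--
--     # tilt the resulting board left
--     newBoard1 = tiltLeft(newBoard1)
--
--     # rotate the board back to the right
--     for col in range(0, 4):
--         loading = 0
--         for row in range(3,-1,-1):
--             newBoard2[col][loading] = newBoard1[row][col]
--             loading = loading + 1
--
--     return newBoard2
-- ===== SOURCE B (Python) =====
-- def merge_line(line):
--     nums = [x for x in line if x != 0]
--     merged = []
--     i = 0
--     while i < len(nums):
--         if i + 1 < len(nums) and nums[i] == nums[i + 1]: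
--             merged.append(nums[i] * 2)
--             i += 2
--         else:
--             merged.append(nums[i])
--             i += 1
--     return merged + [0] * (4 - len(merged))
--
-- def tiltUp(board):
--     result = [[0, 0, 0, 0] for _ in range(4)]
--     for c in range(4):
--         merged = merge_line([board[r][c] for r in range(4)])
--         for r in range(4):
--             result[r][c] = merged[r]
--     return result
-- ===== Notes on version B (the rewrite author's own statement) =====
-- stated objective: simpler
-- what changed: Replaces A's rotate-left / unrolled if-elif merge cascade / rotate-right pipeline with a direct per-column pass: compress nonzeros, merge equal adjacent pairs in one loop, pad with zeros, and write back down the column.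
import Mathlib
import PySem

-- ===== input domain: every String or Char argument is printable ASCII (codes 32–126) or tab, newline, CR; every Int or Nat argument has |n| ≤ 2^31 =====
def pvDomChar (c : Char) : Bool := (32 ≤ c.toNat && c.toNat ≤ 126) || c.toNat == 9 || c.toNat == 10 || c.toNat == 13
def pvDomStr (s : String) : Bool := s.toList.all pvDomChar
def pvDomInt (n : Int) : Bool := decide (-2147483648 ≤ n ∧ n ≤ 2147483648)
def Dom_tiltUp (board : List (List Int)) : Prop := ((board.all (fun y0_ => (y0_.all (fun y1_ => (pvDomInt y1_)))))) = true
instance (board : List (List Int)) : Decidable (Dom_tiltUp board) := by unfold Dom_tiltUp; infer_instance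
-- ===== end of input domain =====

-- B replaces A's rotate/tilt-left/rotate-back scaffolding and unrolled if-elif merge cascade
-- with a direct per-column compress-merge-pad pass (simpler; same results).
-- Indexing note: within Pre_tiltUp every board[r][c] access (r,c < 4) is in range, so the
-- getD-with-default-0 reads below are exact there.

-- ===== PORT A =====
-- board[row][col] for 0 ≤ row,col < 4 (in range under Pre_tiltUp)
def pvAt (board : List (List Int)) (r c : Nat) : Int := (board.getD r []).getD c 0

-- one row of tiltLeft: the slide loop over cols 0..3, then A's unrolled merge cascade
def tiltLeftRow (row : List Int) : List Int :=
  -- "first slide through any spaces": loading counter, write into a [0,0,0,0] row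
  let s := (List.range 4).foldl
    (fun (st : List Int × Nat) col =>
      let v := row.getD col 0
      if v ≠ 0 then (st.1.set st.2 v, st.2 + 1) else st)
    ([0, 0, 0, 0], 0)
  let n := s.1
  let a := n.getD 0 0
  let b := n.getD 1 0
  let c := n.getD 2 0
  let d := n.getD 3 0
  if a = b then
    -- combine 0&1 and slide: row becomes [a*2, c, d, 0]
    if c = d then [a * 2, c * 2, 0, 0]        -- "do resulting 1 and 2 match?"
    else if d = 0 then [a * 2, c, d * 2, 0]   -- "do resulting 2 and 3 match?" (new 3 is 0)
    else [a * 2, c, d, 0]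
  else if b = c then [a, b * 2, d, 0]
  else if c = d then [a, b, c * 2, 0]
  else [a, b, c, d]

def tiltLeft (board : List (List Int)) : List (List Int) :=
  (List.range 4).map (fun r => tiltLeftRow (board.getD r []))

def tiltUp (board : List (List Int)) : List (List Int) :=
  -- rotate the board to the left: newBoard1[i][r] = board[r][3-i]
  let nb1 := (List.range 4).map (fun i => (List.range 4).map (fun r => pvAt board r (3 - i)))
  -- tilt the resulting board left
  let nb1' := tiltLeft nb1
  -- rotate the board back to the right: newBoard2[c][j] = newBoard1[3-j][c]
  (List.range 4).map (fun c => (List.range 4).map (fun j => pvAt nb1' (3 - j) c))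

-- ===== PORT B =====
-- merge the compressed nonzeros: the while loop of Source B as structural recursion
def mergeRec : List Int → List Int
  | x :: y :: rest => if x = y then x * 2 :: mergeRec rest else x :: mergeRec (y :: rest)
  | l => l

def mergeLine (line : List Int) : List Int :=
  let merged := mergeRec (line.filter (fun x => x ≠ 0))
  merged ++ List.replicate (4 - merged.length) 0

def tiltUp_alt (board : List (List Int)) : List (List Int) :=
  let cols := (List.range 4).map
    (fun c => mergeLine ((List.range 4).map (fun r => (board.getD r []).getD c 0)))
  (List.range 4).map (fun r => (List.range 4).map (fun c => (cols.getD c []).getD r 0))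

-- ===== PRECONDITION & SPEC =====
-- Pre_ excludes exactly the boards on which Python A raises IndexError:
-- fewer than 4 rows, or one of the first 4 rows shorter than 4.
def Pre_tiltUp (board : List (List Int)) : Prop :=
  4 ≤ board.length ∧ ∀ r ∈ board.take 4, 4 ≤ r.length
instance (board : List (List Int)) : Decidable (Pre_tiltUp board) := by
  unfold Pre_tiltUp; infer_instance

def pvWitness_tiltUp : List (List Int) :=
  [[2, 0, 2, 4], [2, 0, 0, 4], [0, 0, 2, 2], [4, 4, 0, 2]]

def Spec_tiltUp (board : List (List Int)) (out : List (List Int)) : Prop := out = tiltUp_alt board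
instance (board : List (List Int)) (out : List (List Int)) : Decidable (Spec_tiltUp board out) := by unfold Spec_tiltUp; infer_instance

-- ===== CLAIM (what is proved, stated in full; the proofs are below) =====
def Claim_equal_tiltUp : Prop := ∀ (board : List (List Int)), Dom_tiltUp board → Pre_tiltUp board → Spec_tiltUp board (tiltUp board)

-- ===== LEMMAS AND PROOFS =====

-- A's slide-then-cascade on one line of four equals B's compress-merge-pad.
theorem rowEq (a b c d : Int) :
    tiltLeftRow [a, b, c, d] = mergeLine [a, b, c, d] := by
  by_cases ha : a = 0 <;> by_cases hb : b = 0 <;> by_cases hc : c = 0 <;> by_cases hd : d = 0 <;>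
    simp [tiltLeftRow, mergeLine, mergeRec, List.range_succ, ha, hb, hc, hd] <;>
    split_ifs <;> simp_all

-- ===== VERDICT (by name: the statement is the Claim_ definition above) =====
theorem tiltUp_spec : Claim_equal_tiltUp := by
  intro board _ _
  show tiltUp board = tiltUp_alt board
  simp only [tiltUp, tiltUp_alt, tiltLeft, pvAt, List.range_succ]
  simp only [List.range_zero, List.nil_append, List.cons_append, List.map_cons, List.map_nil,
    List.getD, List.getElem?_cons_zero, List.getElem?_cons_succ, Option.getD_some]
  norm_num
  rw [rowEq, rowEq, rowEq, rowEq]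
  simp
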